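-- pv_equiv track=rewrite | github.com/ahm282/AdventOfCode2024 | python/day_2/main.py | is_gradual
-- ===== SOURCE A (Python) =====
-- def is_gradual(levels, mode):
--     return all(
--         (
--             levels[i] <= levels[i + 1]
--             if mode == "increasing"
--             else levels[i] >= levels[i + 1]
--         )
--         for i in range(len(levels) - 1)
--     )
-- ===== SOURCE B (Python) =====
-- def is_gradual(levels, mode):
--     if mode == "increasing":
--         return levels == sorted(levels)
--     return levels == sorted(levels, reverse=True)
-- ===== Notes on version B (the rewrite author's own statement) =====
-- stated objective: idiomatic
-- what changed: B compares the list with its sorted (or reverse-sorted) copy instead of scanning adjacent index pairs with all().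
import Mathlib
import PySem

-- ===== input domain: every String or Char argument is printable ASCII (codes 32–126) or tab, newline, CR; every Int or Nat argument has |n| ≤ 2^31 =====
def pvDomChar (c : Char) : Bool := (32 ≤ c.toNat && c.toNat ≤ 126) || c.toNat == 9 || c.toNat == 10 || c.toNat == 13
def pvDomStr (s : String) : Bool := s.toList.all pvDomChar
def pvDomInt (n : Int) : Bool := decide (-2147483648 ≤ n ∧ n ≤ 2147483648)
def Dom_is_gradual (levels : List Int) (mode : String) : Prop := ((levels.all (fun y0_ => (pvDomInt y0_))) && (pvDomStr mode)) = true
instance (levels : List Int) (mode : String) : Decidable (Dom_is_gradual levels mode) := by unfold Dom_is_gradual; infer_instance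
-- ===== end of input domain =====

-- B replaces A's adjacent-pair scan by comparing the list with its sorted (or
-- reverse-sorted) copy: idiomatic, at the cost of an O(n log n) sort.

-- ===== PORT A =====
-- all((levels[i] <= levels[i+1] if mode == "increasing" else levels[i] >= levels[i+1])
--     for i in range(len(levels) - 1))
def is_gradual (levels : List Int) (mode : String) : Bool :=
  (PySem.List.pyRange 0 ((levels.length : Int) - 1) 1).all (fun i =>
    match PySem.List.pyGet? levels i, PySem.List.pyGet? levels (i + 1) with
    | some a, some b => if mode == "increasing" then decide (a ≤ b) else decide (b ≤ a)
    | _, _ => false)   -- unreachable: i and i+1 are in range for i in range(len-1)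

-- ===== PORT B =====
def is_gradual_alt (levels : List Int) (mode : String) : Bool :=
  if mode == "increasing" then
    decide (levels = PySem.List.sorted levels (fun x => x) false)
  else
    decide (levels = PySem.List.sorted levels (fun x => x) true)

-- ===== PRECONDITION & SPEC =====
def Spec_is_gradual (levels : List Int) (mode : String) (out : Bool) : Prop := out = is_gradual_alt levels mode
instance (levels : List Int) (mode : String) (out : Bool) : Decidable (Spec_is_gradual levels mode out) := by unfold Spec_is_gradual; infer_instance

-- ===== CLAIM (what is proved, stated in full; the proofs are below) =====
def Claim_equal_is_gradual : Prop := ∀ (levels : List Int) (mode : String), Dom_is_gradual levels mode → Spec_is_gradual levels mode (is_gradual levels mode)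

-- ===== LEMMAS AND PROOFS =====

-- A's generator is true at every index iff the list is adjacent-chained by r.
theorem pv_scan_iff (levels : List Int) (r : Int → Int → Bool) :
    ((PySem.List.pyRange 0 ((levels.length : Int) - 1) 1).all (fun i =>
      match PySem.List.pyGet? levels i, PySem.List.pyGet? levels (i + 1) with
      | some a, some b => r a b
      | _, _ => false) = true)
    ↔ List.IsChain (fun a b => r a b = true) levels := by
  rw [List.all_eq_true, List.isChain_iff_getElem]
  constructor
  · intro h i hi
    have hm : (i : Int) ∈ PySem.List.pyRange 0 ((levels.length : Int) - 1) 1 := by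
      rw [PySem.List.mem_pyRange_one]; omega
    have := h _ hm
    have h1 : PySem.List.pyGet? levels (i : Int) = some levels[i] := by
      rw [PySem.List.pyGet?_natCast, List.getElem?_eq_getElem (by omega)]
    have h2 : PySem.List.pyGet? levels ((i : Int) + 1) = some levels[i + 1] := by
      have : ((i : Int) + 1) = ((i + 1 : Nat) : Int) := by push_cast; ring
      rw [this, PySem.List.pyGet?_natCast, List.getElem?_eq_getElem (by omega)]
    rw [h1, h2] at this
    exact this
  · intro h i hi
    rw [PySem.List.mem_pyRange_one] at hi
    obtain ⟨h0, hlt⟩ := hi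
    have hnat : ∃ k : Nat, (i : Int) = (k : Int) ∧ k + 1 < levels.length := by
      refine ⟨i.toNat, by omega, by omega⟩
    obtain ⟨k, hk, hklt⟩ := hnat
    subst hk
    have h1 : PySem.List.pyGet? levels (k : Int) = some levels[k] := by
      rw [PySem.List.pyGet?_natCast, List.getElem?_eq_getElem (by omega)]
    have h2 : PySem.List.pyGet? levels ((k : Int) + 1) = some levels[k + 1] := by
      have : ((k : Int) + 1) = ((k + 1 : Nat) : Int) := by push_cast; ring
      rw [this, PySem.List.pyGet?_natCast, List.getElem?_eq_getElem (by omega)]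
    rw [h1, h2]
    exact h k hklt

theorem pv_sorted_iff (levels : List Int) :
    levels = PySem.List.sorted levels (fun x => x) false ↔
      List.Pairwise (fun a b : Int => a ≤ b) levels := by
  constructor
  · intro h
    have := PySem.List.sorted_pairwise (xs := levels) (key := fun x : Int => x)
    rw [← h] at this
    exact this
  · intro h
    exact Eq.symm (PySem.List.sorted_eq_self_of_pairwise levels (fun x => x) h)

theorem pv_sorted_rev_iff (levels : List Int) :
    levels = PySem.List.sorted levels (fun x => x) true ↔
      List.Pairwise (fun a b : Int => b ≤ a) levels := by
  constructor
  · intro h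
    have := PySem.List.sorted_pairwise_rev (xs := levels) (key := fun x : Int => x)
    rw [← h] at this
    exact this
  · intro h
    exact Eq.symm (PySem.List.sorted_rev_eq_self_of_pairwise levels (fun x => x) h)

-- ===== VERDICT (by name: the statement is the Claim_ definition above) =====
theorem is_gradual_spec : Claim_equal_is_gradual := by
  intro levels mode _
  unfold Spec_is_gradual is_gradual is_gradual_alt
  by_cases hm : mode == "increasing"
  · simp only [hm, if_true]
    rw [Bool.eq_iff_iff, decide_eq_true_iff, pv_sorted_iff,
      ← List.isChain_iff_pairwise (R := fun a b : Int => a ≤ b)]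
    have := pv_scan_iff levels (fun a b => decide (a ≤ b))
    simp only [decide_eq_true_iff] at this
    exact this
  · simp only [hm, if_false, Bool.false_eq_true]
    letI : Trans (fun a b : Int => b ≤ a) (fun a b : Int => b ≤ a) (fun a b : Int => b ≤ a) :=
      ⟨fun h1 h2 => le_trans h2 h1⟩
    rw [Bool.eq_iff_iff, decide_eq_true_iff, pv_sorted_rev_iff,
      ← List.isChain_iff_pairwise (R := fun a b : Int => b ≤ a)]
    have := pv_scan_iff levels (fun a b => decide (b ≤ a))
    simp only [decide_eq_true_iff] at this
    exact this
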